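-- pv_equiv track=rewrite | github.com/thumbe12856/competitive-programming | AA/L1/Candy2/solve.py | solve
-- ===== SOURCE A (Python) =====
-- def solve(N, nums):
--     i = 2
--     while True:
--         valid = True
--         for n in nums:
--             if n % i == 0:
--                 valid = False
--                 break
--
--         if valid:
--             return i
--         i += 1
-- ===== SOURCE B (Python) =====
-- def solve(N, nums):
--     # Collect every positive divisor of every |num| via sqrt factorization,
--     # then scan for the smallest i >= 2 outside that set (alternative algorithm; no speed claim).
--     divs = set()
--     for n in nums:
--         m = abs(n)
--         d = 1
--         while d * d <= m:
--             if m % d == 0: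
--                 divs.add(d)
--                 divs.add(m // d)
--             d += 1
--     i = 2
--     while i in divs:
--         i += 1
--     return i
-- ===== Notes on version B (the rewrite author's own statement) =====
-- stated objective: alternative
-- what changed: B never tests candidates against the list: it enumerates all divisors of each |num| once via sqrt factorization into a set and then scans for the smallest i>=2 missing from that set.
import Mathlib
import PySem

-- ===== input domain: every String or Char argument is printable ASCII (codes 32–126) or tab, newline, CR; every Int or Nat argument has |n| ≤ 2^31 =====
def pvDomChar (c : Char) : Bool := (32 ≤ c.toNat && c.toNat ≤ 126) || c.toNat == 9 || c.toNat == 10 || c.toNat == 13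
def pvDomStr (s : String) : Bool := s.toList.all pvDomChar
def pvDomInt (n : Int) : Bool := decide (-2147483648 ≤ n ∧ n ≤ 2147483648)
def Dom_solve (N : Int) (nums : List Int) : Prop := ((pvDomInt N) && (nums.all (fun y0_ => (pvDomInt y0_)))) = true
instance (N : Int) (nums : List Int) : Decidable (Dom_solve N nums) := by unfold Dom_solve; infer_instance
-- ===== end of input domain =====

-- B replaces A's trial of every candidate i against the whole list by one sqrt-factorization
-- pass collecting all divisors into a set, then a scan for the smallest i >= 2 missing from it
-- (objective: alternative — a genuinely different algorithm, no speed claim).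

-- ===== PORT A =====
-- A's 'while True' loop; the fuel only makes the unbounded search total (it is never
-- exhausted under Pre_solve: some i ≤ max|n|+1 divides no element).
def solveLoopA (nums : List Int) : Nat → Int → Int
  | 0, i => i
  | fuel+1, i =>
    if nums.all (fun n => !(PySem.Int.mod n i == 0)) then i
    else solveLoopA nums fuel (i+1)

def solve (N : Int) (nums : List Int) : Int :=
  solveLoopA nums (nums.foldl (fun a n => max a n.natAbs) 0 + 2) 2

-- ===== PORT B =====
-- inner 'while d*d <= m' of Source B; fuel m+1 covers every iteration (d reaches at most sqrt m + 1).
def divLoop (m : Int) : Nat → Int → PySem.Set Int → PySem.Set Int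
  | 0, _, s => s
  | fuel+1, d, s =>
    if d * d ≤ m then
      divLoop m fuel (d+1)
        (if PySem.Int.mod m d == 0 then PySem.Set.add (PySem.Set.add s d) (PySem.Int.floordiv m d) else s)
    else s

-- Source B's first for-loop: all positive divisors of every |n|
def buildDivs (nums : List Int) : PySem.Set Int :=
  nums.foldl (fun s n => divLoop (n.natAbs : Int) (n.natAbs + 1) 1 s) PySem.Set.empty

-- Source B's 'while i in divs: i += 1'; fuel (max element)+2 is never exhausted.
def scanLoop (divs : PySem.Set Int) : Nat → Int → Int
  | 0, i => i
  | fuel+1, i => if PySem.Set.contains divs i then scanLoop divs fuel (i+1) else i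

def solve_alt (N : Int) (nums : List Int) : Int :=
  let divs := buildDivs nums
  scanLoop divs (divs.foldl (fun a e => max a e.toNat) 0 + 2) 2

-- ===== PRECONDITION & SPEC =====
-- A never returns when 0 ∈ nums (0 % i == 0 for every i, so the while-True loop runs forever);
-- Pre_solve excludes exactly those inputs.
def Pre_solve (N : Int) (nums : List Int) : Prop := (0 : Int) ∉ nums
instance (N : Int) (nums : List Int) : Decidable (Pre_solve N nums) := by unfold Pre_solve; infer_instance
def pvWitness_solve : Int × List Int := (3, [2, 3, -4])

def Spec_solve (N : Int) (nums : List Int) (out : Int) : Prop := out = solve_alt N nums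
instance (N : Int) (nums : List Int) (out : Int) : Decidable (Spec_solve N nums out) := by unfold Spec_solve; infer_instance

-- ===== CLAIM (what is proved, stated in full; the proofs are below) =====
def Claim_equal_solve : Prop := ∀ (N : Int) (nums : List Int), Dom_solve N nums → Pre_solve N nums → Spec_solve N nums (solve N nums)

-- ===== LEMMAS AND PROOFS =====

-- the common shape of both while-loops: first i ≥ start satisfying c, with fuel
def search (c : Int → Bool) : Nat → Int → Int
  | 0, i => i
  | fuel+1, i => if c i then i else search c fuel (i+1)

theorem solveLoopA_eq_search (nums : List Int) (fuel : Nat) (i : Int) :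
    solveLoopA nums fuel i = search (fun i => nums.all (fun n => !(PySem.Int.mod n i == 0))) fuel i := by
  induction fuel generalizing i with
  | zero => rfl
  | succ f ih => simp only [solveLoopA, search, ih]

theorem scanLoop_eq_search (divs : PySem.Set Int) (fuel : Nat) (i : Int) :
    scanLoop divs fuel i = search (fun i => !(PySem.Set.contains divs i)) fuel i := by
  induction fuel generalizing i with
  | zero => rfl
  | succ f ih =>
    simp only [scanLoop, search, ih, Bool.not_eq_eq_eq_not, Bool.not_true]
    by_cases h : PySem.Set.contains divs i <;> simp [h]

-- search returns the least good j ≥ i, provided fuel reaches it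
theorem search_spec (c : Int → Bool) : ∀ (fuel : Nat) (i j : Int), i ≤ j → j < i + (fuel : Int) →
    c j = true → (∀ k, i ≤ k → k < j → c k = false) → search c fuel i = j := by
  intro fuel
  induction fuel with
  | zero => intro i j h1 h2 _ _; exfalso; omega
  | succ f ih =>
    intro i j h1 h2 hj hmin
    simp only [search]
    by_cases hc : c i = true
    · have : j = i := by
        by_contra hne
        have := hmin i le_rfl (by omega)
        simp [this] at hc
      simp [hc, this]
    · have hji : i ≠ j := fun h => hc (h ▸ hj)
      simp only [hc, if_false]
      exact ih (i+1) j (by omega) (by push_cast; push_cast at h2; omega) hj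
        (fun k hk1 hk2 => hmin k (by omega) hk2)

theorem search_congr (c c' : Int → Bool) (h : ∀ j, 2 ≤ j → c j = c' j) :
    ∀ (fuel : Nat) (i : Int), 2 ≤ i → search c fuel i = search c' fuel i := by
  intro fuel
  induction fuel with
  | zero => intro i _; rfl
  | succ f ih =>
    intro i hi
    simp only [search, h i hi]
    by_cases hc : c' i = true
    · simp [hc]
    · simp only [hc, if_false]; exact ih (i+1) (by omega)

-- membership in the divLoop result
theorem divLoop_mem (m : Int) (hm : 0 ≤ m) :
    ∀ (fuel : Nat) (d : Int) (s : PySem.Set Int) (k : Int), 1 ≤ d → m < (d + fuel) * (d + fuel) →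
    (k ∈ divLoop m fuel d s ↔ k ∈ s ∨
      ∃ e : Int, d ≤ e ∧ e * e ≤ m ∧ e ∣ m ∧ (k = e ∨ k = m / e)) := by
  intro fuel
  induction fuel with
  | zero =>
    intro d s k hd hlt
    simp only [divLoop, Nat.cast_zero, add_zero] at *
    constructor
    · intro h; exact Or.inl h
    · rintro (h | ⟨e, he, hee, _, _⟩)
      · exact h
      · exfalso; nlinarith
  | succ f ih =>
    intro d s k hd hlt
    simp only [divLoop]
    by_cases hdd : d * d ≤ m
    · simp only [hdd, if_true]
      rw [ih (d+1) _ k (by omega) (by push_cast at hlt ⊢; nlinarith)]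
      by_cases hdvd : PySem.Int.mod m d == 0
      · have hdvd' : d ∣ m := by
          rw [← PySem.Int.mod_eq_zero_iff_dvd]; exact of_decide_eq_true hdvd
        simp only [hdvd, if_true, PySem.Set.mem_add,
          PySem.Int.floordiv_eq_ediv_of_pos (by omega : (0:Int) < d)]
        constructor
        · rintro ((⟨h | h⟩ | h) | ⟨e, he, hee, hed, hk⟩)
          · exact Or.inl h
          · exact Or.inr ⟨d, le_rfl, hdd, hdvd', Or.inl h⟩
          · exact Or.inr ⟨d, le_rfl, hdd, hdvd', Or.inr h⟩
          · exact Or.inr ⟨e, by omega, hee, hed, hk⟩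
        · rintro (h | ⟨e, he, hee, hed, hk⟩)
          · exact Or.inl (Or.inl (Or.inl h))
          · rcases eq_or_lt_of_le he with heq | hlt'
            · subst heq
              rcases hk with hk | hk
              · exact Or.inl (Or.inl (Or.inr hk))
              · exact Or.inl (Or.inr hk)
            · exact Or.inr ⟨e, by omega, hee, hed, hk⟩
      · have hndvd : ¬ (d ∣ m) := by
          rw [← PySem.Int.mod_eq_zero_iff_dvd]
          intro h; simp [h] at hdvd
        simp only [hdvd, if_false]
        constructor
        · rintro (h | ⟨e, he, hee, hed, hk⟩)
          · exact Or.inl h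
          · exact Or.inr ⟨e, by omega, hee, hed, hk⟩
        · rintro (h | ⟨e, he, hee, hed, hk⟩)
          · exact Or.inl h
          · rcases eq_or_lt_of_le he with heq | hlt'
            · subst heq; exact absurd hed hndvd
            · exact Or.inr ⟨e, by omega, hee, hed, hk⟩
    · simp only [hdd, if_false]
      constructor
      · intro h; exact Or.inl h
      · rintro (h | ⟨e, he, hee, _, _⟩)
        · exact h
        · exfalso; nlinarith

-- the sqrt-enumeration catches exactly the positive divisors (m ≥ 1)
theorem div_char (m k : Int) (hm : 1 ≤ m) :
    (∃ e : Int, 1 ≤ e ∧ e * e ≤ m ∧ e ∣ m ∧ (k = e ∨ k = m / e)) ↔ (1 ≤ k ∧ k ∣ m) := by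
  constructor
  · rintro ⟨e, he, hee, hed, hk | hk⟩
    · subst hk; exact ⟨he, hed⟩
    · subst hk
      obtain ⟨c, hc⟩ := hed
      have he0 : (0:Int) < e := by omega
      have hdiv : m / e = c := by rw [hc]; exact Int.mul_ediv_cancel_left c (by omega)
      rw [hdiv]
      constructor
      · nlinarith
      · exact ⟨e, by linarith [hc, mul_comm e c]⟩
  · rintro ⟨hk, hkd⟩
    obtain ⟨c, hc⟩ := hkd
    have hk0 : (0:Int) < k := by omega
    have hc0 : (0:Int) < c := by nlinarith
    by_cases hkk : k * k ≤ m
    · exact ⟨k, hk, hkk, ⟨c, hc⟩, Or.inl rfl⟩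
    · have hck : c < k := by nlinarith
      have hcc : c * c ≤ m := by nlinarith
      refine ⟨c, by omega, hcc, ⟨k, by rw [hc, mul_comm]⟩, Or.inr ?_⟩
      rw [hc]; exact (Int.mul_ediv_cancel k (by omega : c ≠ 0)).symm

-- buildDivs = all positive divisors of elements of nums (when 0 ∉ nums)
theorem buildDivs_mem (nums : List Int) (h0 : (0:Int) ∉ nums) (k : Int) :
    k ∈ buildDivs nums ↔ ∃ n ∈ nums, 1 ≤ k ∧ k ∣ n := by
  unfold buildDivs
  suffices H : ∀ (l : List Int), (0:Int) ∉ l → ∀ (s : PySem.Set Int),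
      (k ∈ l.foldl (fun s n => divLoop (n.natAbs : Int) (n.natAbs + 1) 1 s) s ↔
        k ∈ s ∨ ∃ n ∈ l, 1 ≤ k ∧ k ∣ n) by
    rw [H nums h0 PySem.Set.empty]; simp [PySem.Set.empty]
  intro l
  induction l with
  | nil => intro _ s; simp
  | cons n t ih =>
    intro h0' s
    have hn : n ≠ 0 := fun h => h0' (h ▸ List.mem_cons_self ..)
    have h0t : (0:Int) ∉ t := fun h => h0' (List.mem_cons_of_mem _ h)
    simp only [List.foldl_cons, ih h0t, List.mem_cons]
    have hm : (0:Int) ≤ (n.natAbs : Int) := by positivity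
    rw [divLoop_mem (n.natAbs : Int) hm (n.natAbs + 1) 1 s k le_rfl (by push_cast; nlinarith)]
    have hm1 : (1:Int) ≤ (n.natAbs : Int) := by
      have := Int.natAbs_pos.mpr hn; exact_mod_cast this
    rw [div_char _ k hm1]
    constructor
    · rintro ((h | ⟨hk, hkd⟩) | h)
      · exact Or.inl h
      · exact Or.inr ⟨n, Or.inl rfl, hk, (Int.dvd_natAbs).mp hkd⟩
      · obtain ⟨x, hx, hk⟩ := h; exact Or.inr ⟨x, Or.inr hx, hk⟩
    · rintro (h | ⟨x, hx | hx, hk, hkd⟩)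
      · exact Or.inl (Or.inl h)
      · subst hx; exact Or.inl (Or.inr ⟨hk, (Int.dvd_natAbs).mpr hkd⟩)
      · exact Or.inr ⟨x, hx, hk, hkd⟩

-- foldl-max bounds
theorem foldl_max_bound {α : Type} (f : α → Nat) (l : List α) :
    ∀ (a : Nat), a ≤ l.foldl (fun acc y => max acc (f y)) a ∧
      ∀ x ∈ l, f x ≤ l.foldl (fun acc y => max acc (f y)) a := by
  induction l with
  | nil => intro a; simp
  | cons h t ih =>
    intro a
    have := ih (max a (f h))
    constructor
    · simp only [List.foldl_cons]; omega
    · intro x hx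
      rcases List.mem_cons.mp hx with rfl | hx
      · simp only [List.foldl_cons]; omega
      · exact this.2 x hx

-- the two loop conditions agree on i ≥ 2 (under Pre)
theorem cond_agree (nums : List Int) (h0 : (0:Int) ∉ nums) (i : Int) (hi : 2 ≤ i) :
    (nums.all (fun n => !(PySem.Int.mod n i == 0))) = (!(PySem.Set.contains (buildDivs nums) i)) := by
  have hmem : i ∈ buildDivs nums ↔ ∃ n ∈ nums, i ∣ n := by
    rw [buildDivs_mem nums h0 i]
    constructor
    · rintro ⟨n, hn, _, hd⟩; exact ⟨n, hn, hd⟩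
    · rintro ⟨n, hn, hd⟩; exact ⟨n, hn, by omega, hd⟩
  by_cases h : ∃ n ∈ nums, i ∣ n
  · obtain ⟨n, hn, hd⟩ := h
    have h1 : PySem.Set.contains (buildDivs nums) i = true := by
      simpa [PySem.Set.contains] using hmem.mpr ⟨n, hn, hd⟩
    have h2 : nums.all (fun n => !(PySem.Int.mod n i == 0)) = false := by
      simp only [List.all_eq_false]
      refine ⟨n, hn, ?_⟩
      simp [PySem.Int.mod_eq_zero_iff_dvd, hd]
    rw [h1, h2]; rfl
  · push_neg at h
    have h1 : PySem.Set.contains (buildDivs nums) i = false := by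
      rw [Bool.eq_false_iff]
      intro hc
      have hc' : i ∈ buildDivs nums := by simpa [PySem.Set.contains] using hc
      obtain ⟨n, hn, hd⟩ := hmem.mp hc'
      exact h n hn hd
    have h2 : nums.all (fun n => !(PySem.Int.mod n i == 0)) = true := by
      simp only [List.all_eq_true]
      intro n hn
      have := h n hn
      simp [PySem.Int.mod_eq_zero_iff_dvd, this]
    rw [h1, h2]; rfl

-- ===== VERDICT (by name: the statement is the Claim_ definition above) =====
theorem solve_spec : Claim_equal_solve := by
  intro N nums _ hpre
  unfold Spec_solve solve solve_alt
  rw [solveLoopA_eq_search, scanLoop_eq_search]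
  set divs := buildDivs nums with hdivs
  set cB : Int → Bool := fun i => !(PySem.Set.contains divs i) with hcB
  have hcong : ∀ j, 2 ≤ j → (nums.all (fun n => !(PySem.Int.mod n j == 0))) = cB j :=
    fun j hj => cond_agree nums hpre j hj
  rw [search_congr _ cB hcong _ 2 le_rfl]
  -- both sides are now 'search cB' with different fuels; both fuels reach the least good j
  set MA : Nat := nums.foldl (fun a n => max a n.natAbs) 0 with hMA
  set MB : Nat := divs.foldl (fun a e => max a e.toNat) 0 with hMB
  have hgoodB : cB (2 + (MB : Int)) = true := by
    have hnm : (2 + (MB : Int)) ∉ divs := by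
      intro hmem
      have := (foldl_max_bound (fun e : Int => e.toNat) divs 0).2 _ hmem
      omega
    simp [hcB, PySem.Set.contains, hnm]
  have hgoodA : cB (2 + (MA : Int)) = true := by
    rw [← hcong _ (by omega)]
    simp only [List.all_eq_true, Bool.not_eq_eq_eq_not, Bool.not_true, beq_eq_false_iff_ne,
      ne_eq, PySem.Int.mod_eq_zero_iff_dvd]
    intro n hn hdvd
    have hb := (foldl_max_bound (fun n : Int => n.natAbs) nums 0).2 n hn
    have hn0 : n ≠ 0 := fun h => hpre (h ▸ hn)
    have h1 : (2 + (MA : Int)) ∣ (n.natAbs : Int) := (Int.dvd_natAbs).mpr hdvd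
    have h2 : 2 + (MA : Int) ≤ (n.natAbs : Int) :=
      Int.le_of_dvd (by exact_mod_cast Int.natAbs_pos.mpr hn0) h1
    omega
  have hex : ∃ t : Nat, cB (2 + (t : Int)) = true := ⟨MB, hgoodB⟩
  set F : Nat := Nat.find hex with hF
  have hjgood : cB (2 + (F : Int)) = true := Nat.find_spec hex
  have hmin : ∀ k : Int, 2 ≤ k → k < 2 + (F : Int) → cB k = false := by
    intro k hk1 hk2
    have ht : (k - 2).toNat < F := by omega
    have := Nat.find_min hex ht
    have hk : 2 + ((k - 2).toNat : Int) = k := by omega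
    rw [hk] at this
    exact Bool.not_eq_true _ ▸ Bool.eq_false_iff.mpr this
  have hFA : F ≤ MA := Nat.find_le hgoodA
  have hFB : F ≤ MB := Nat.find_le hgoodB
  rw [search_spec cB (MA + 2) 2 (2 + (F : Int)) (by omega) (by push_cast; omega) hjgood hmin,
      search_spec cB (MB + 2) 2 (2 + (F : Int)) (by omega) (by push_cast; omega) hjgood hmin]
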